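-- pv_equiv track=rewrite | github.com/ajalty-hub/HS_Code_Summary | app.py | smart_map
-- ===== SOURCE A (Python) =====
-- def smart_map(columns):
--     mapping = {}
--
--     def find_col(keywords):
--         for col in columns:
--             col_lower = col.lower()
--             if any(k in col_lower for k in keywords):
--                 return col
--         return None
--
--     mapping["QTY"] = find_col(["qty", "quantity"])
--     mapping["Description"] = find_col(["desc", "description", "item"])
--     mapping["Amount"] = find_col(["amount", "value", "price"])
--     mapping["HS Code"] = find_col(["hs", "code"])
--     mapping["COO"] = find_col(["coo", "origin", "country"])
--     mapping["GW"] = find_col(["gw", "gross"])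
--     mapping["NW"] = find_col(["nw", "net"])
--
--     return mapping
-- ===== SOURCE B (Python) =====
-- FIELDS = [
--     ("QTY", ["qty", "quantity"]),
--     ("Description", ["desc", "description", "item"]),
--     ("Amount", ["amount", "value", "price"]),
--     ("HS Code", ["hs", "code"]),
--     ("COO", ["coo", "origin", "country"]),
--     ("GW", ["gw", "gross"]),
--     ("NW", ["nw", "net"]),
-- ]
--
--
-- def smart_map(columns):
--     # single pass over the columns; each field keeps the first matching column
--     state = [(f, kws, None) for f, kws in FIELDS]
--     for col in columns:
--         cl = col.lower()
--         state = [
--             (f, kws, v if v is not None else (col if any(k in cl for k in kws) else None))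
--             for f, kws, v in state
--         ]
--     return {f: v for f, kws, v in state}
-- ===== Notes on version B (the rewrite author's own statement) =====
-- stated objective: simpler
-- what changed: A scans the column list once per field (seven independent find_col passes); B makes a single pass over the columns, lowercasing each column once and assigning it to every still-unfilled field whose keywords it matches.
import Mathlib
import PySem

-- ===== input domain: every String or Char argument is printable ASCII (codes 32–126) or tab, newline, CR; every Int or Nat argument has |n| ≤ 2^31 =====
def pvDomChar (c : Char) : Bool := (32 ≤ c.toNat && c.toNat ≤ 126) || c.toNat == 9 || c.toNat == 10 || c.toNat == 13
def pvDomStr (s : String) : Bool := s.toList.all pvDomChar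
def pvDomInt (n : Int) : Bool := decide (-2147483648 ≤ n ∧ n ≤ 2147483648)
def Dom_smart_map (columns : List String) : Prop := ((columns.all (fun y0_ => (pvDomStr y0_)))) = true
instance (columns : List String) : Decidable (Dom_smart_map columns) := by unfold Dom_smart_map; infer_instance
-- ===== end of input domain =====

-- B replaces A's seven independent scans of `columns` by one classifying pass over the
-- columns that lowercases each column once (objective: simpler single-pass decomposition).

-- ===== PORT A =====
-- A's inner helper find_col(keywords): first column whose lowercase form contains a keyword.
def pvFindCol (columns : List String) (keywords : List String) : Option String :=
  columns.findSome? (fun col =>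
    let col_lower := PySem.Str.lower col
    if keywords.any (fun k => PySem.Str.isIn k col_lower) then some col else none)

def smart_map (columns : List String) : List (String × Option String) :=
  [("QTY", pvFindCol columns ["qty", "quantity"]),
   ("Description", pvFindCol columns ["desc", "description", "item"]),
   ("Amount", pvFindCol columns ["amount", "value", "price"]),
   ("HS Code", pvFindCol columns ["hs", "code"]),
   ("COO", pvFindCol columns ["coo", "origin", "country"]),
   ("GW", pvFindCol columns ["gw", "gross"]),
   ("NW", pvFindCol columns ["nw", "net"])]

-- ===== PORT B =====
def pvFields : List (String × List String) :=
  [("QTY", ["qty", "quantity"]),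
   ("Description", ["desc", "description", "item"]),
   ("Amount", ["amount", "value", "price"]),
   ("HS Code", ["hs", "code"]),
   ("COO", ["coo", "origin", "country"]),
   ("GW", ["gw", "gross"]),
   ("NW", ["nw", "net"])]

-- one column of Source B's loop body: fill every still-empty field this column matches
def pvStep (st : List (String × List String × Option String)) (col : String) :
    List (String × List String × Option String) :=
  let cl := PySem.Str.lower col
  st.map (fun t =>
    (t.1, t.2.1,
      match t.2.2 with
      | some v => some v
      | none => if t.2.1.any (fun k => PySem.Str.isIn k cl) then some col else none))

def smart_map_alt (columns : List String) : List (String × Option String) :=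
  let state0 := pvFields.map (fun fk => (fk.1, fk.2, (none : Option String)))
  let state := columns.foldl pvStep state0
  state.map (fun t => (t.1, t.2.2))

-- ===== PRECONDITION & SPEC =====
def Spec_smart_map (columns : List String) (out : List (String × Option String)) : Prop := out = smart_map_alt columns
instance (columns : List String) (out : List (String × Option String)) : Decidable (Spec_smart_map columns out) := by unfold Spec_smart_map; infer_instance

-- ===== CLAIM (what is proved, stated in full; the proofs are below) =====
def Claim_equal_smart_map : Prop := ∀ (columns : List String), Dom_smart_map columns → Spec_smart_map columns (smart_map columns)

-- ===== LEMMAS AND PROOFS =====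

-- appending one column to the scanned prefix updates A's find_col exactly like B's per-field rule
theorem pvFindCol_append (p : List String) (c : String) (kws : List String) :
    pvFindCol (p ++ [c]) kws =
      match pvFindCol p kws with
      | some v => some v
      | none => if kws.any (fun k => PySem.Str.isIn k (PySem.Str.lower c)) then some c else none := by
  simp only [pvFindCol, List.findSome?_append]
  cases (p.findSome? (fun col =>
      let col_lower := PySem.Str.lower col
      if kws.any (fun k => PySem.Str.isIn k col_lower) then some col else none)) <;>
    simp

-- loop invariant: after scanning prefix p, B's state holds pvFindCol p per field
theorem pvFold_inv (cs : List String) : ∀ (p : List String),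
    cs.foldl pvStep (pvFields.map (fun fk => (fk.1, fk.2, pvFindCol p fk.2))) =
      pvFields.map (fun fk => (fk.1, fk.2, pvFindCol (p ++ cs) fk.2)) := by
  induction cs with
  | nil => intro p; simp
  | cons c cs ih =>
    intro p
    have hstep : pvStep (pvFields.map (fun fk => (fk.1, fk.2, pvFindCol p fk.2))) c =
        pvFields.map (fun fk => (fk.1, fk.2, pvFindCol (p ++ [c]) fk.2)) := by
      simp only [pvStep, List.map_map]
      refine List.map_congr_left (fun fk _ => ?_)
      simp [pvFindCol_append]
    calc (c :: cs).foldl pvStep (pvFields.map (fun fk => (fk.1, fk.2, pvFindCol p fk.2)))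
        = cs.foldl pvStep (pvFields.map (fun fk => (fk.1, fk.2, pvFindCol (p ++ [c]) fk.2))) := by
          rw [List.foldl_cons, hstep]
      _ = pvFields.map (fun fk => (fk.1, fk.2, pvFindCol ((p ++ [c]) ++ cs) fk.2)) := ih (p ++ [c])
      _ = pvFields.map (fun fk => (fk.1, fk.2, pvFindCol (p ++ c :: cs) fk.2)) := by
          simp

theorem smart_map_alt_eq (columns : List String) :
    smart_map_alt columns = smart_map columns := by
  have h0 : (pvFields.map (fun fk => (fk.1, fk.2, (none : Option String)))) =
      pvFields.map (fun fk => (fk.1, fk.2, pvFindCol [] fk.2)) := rfl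
  show (columns.foldl pvStep (pvFields.map (fun fk => (fk.1, fk.2, (none : Option String))))).map
      (fun t => (t.1, t.2.2)) = smart_map columns
  rw [h0, pvFold_inv columns []]
  simp [pvFields, smart_map]

-- ===== VERDICT (by name: the statement is the Claim_ definition above) =====
theorem smart_map_spec : Claim_equal_smart_map := by
  intro columns _
  unfold Spec_smart_map
  exact (smart_map_alt_eq columns).symm
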